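-- pv_equiv track=rewrite | github.com/fidtal24/nums_and_letters | puzzle.py | concat_nums_and_words
-- ===== SOURCE A (Python) =====
-- def concat_nums_and_words(nums: list[str], words: list[str]) -> tuple[str, str]:
-- 	concat_nums = ""
-- 	concat_words = ""
--
-- 	for (num, word) in zip(nums, words):
-- 		if not len(num) == len(word):
-- 			# The return values' length compared against each other. So this return value is
-- 			# equivalent to False.
-- 			return ("12", "1")
--
-- 		concat_nums += num
-- 		concat_words += word
--
-- 	return concat_nums, concat_words
-- ===== SOURCE B (Python) =====
-- def _go(nums, words, lo, hi):
--     # divide and conquer over the index range [lo, hi); None signals a mismatch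
--     if hi - lo == 0:
--         return ("", "")
--     if hi - lo == 1:
--         n, w = nums[lo], words[lo]
--         if len(n) != len(w):
--             return None
--         return (n, w)
--     mid = (lo + hi) // 2
--     left = _go(nums, words, lo, mid)
--     if left is None:
--         return None
--     right = _go(nums, words, mid, hi)
--     if right is None:
--         return None
--     return (left[0] + right[0], left[1] + right[1])
--
-- def concat_nums_and_words(nums: list[str], words: list[str]) -> tuple[str, str]:
--     r = _go(nums, words, 0, min(len(nums), len(words)))
--     return ("12", "1") if r is None else r
-- ===== Notes on version B (the rewrite author's own statement) =====
-- stated objective: alternative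
-- what changed: Replaces A's single left-to-right accumulate-while-checking loop over zip by a divide-and-conquer recursion on the index range: each half is validated and concatenated independently, halves are merged by pairwise concatenation, and a mismatch is signalled with an Option (None) that the wrapper maps to the sentinel.
import Mathlib
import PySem

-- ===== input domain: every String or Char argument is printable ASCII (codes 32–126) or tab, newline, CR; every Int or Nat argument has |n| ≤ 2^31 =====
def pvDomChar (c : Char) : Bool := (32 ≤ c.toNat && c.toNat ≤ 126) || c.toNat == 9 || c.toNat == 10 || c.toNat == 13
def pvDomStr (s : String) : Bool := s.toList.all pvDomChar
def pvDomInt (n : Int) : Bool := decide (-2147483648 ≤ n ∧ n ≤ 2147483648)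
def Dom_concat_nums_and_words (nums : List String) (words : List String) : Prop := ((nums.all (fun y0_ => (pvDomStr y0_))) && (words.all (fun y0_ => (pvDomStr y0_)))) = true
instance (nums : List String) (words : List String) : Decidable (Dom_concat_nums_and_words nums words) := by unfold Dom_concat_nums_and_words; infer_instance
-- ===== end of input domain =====

-- B replaces A's left-to-right accumulate-while-checking loop over zip by a
-- divide-and-conquer recursion on the index range, merging the two halves'
-- concatenations and signalling a mismatch with Option none (mapped to the sentinel).

-- ===== PORT A =====
-- the for-loop over zip(nums, words) with its two string accumulators and early return
def pvALoop : List (String × String) → String → String → String × String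
  | [], concat_nums, concat_words => (concat_nums, concat_words)
  | (num, word) :: rest, concat_nums, concat_words =>
    if !(PySem.Str.len num == PySem.Str.len word) then ("12", "1")
    else pvALoop rest (concat_nums ++ num) (concat_words ++ word)

def concat_nums_and_words (nums : List String) (words : List String) : String × String :=
  pvALoop (nums.zip words) "" ""

-- ===== PORT B =====
-- _go from Source B: divide and conquer on [lo, hi); none = mismatch.
-- nums[lo] / words[lo] are in range on every call made (lo < min of the lengths),
-- so the getD default "" is never the value used; it only makes the port total.
def pvGo (nums words : List String) (lo hi : Nat) : Option (String × String) :=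
  if hi - lo = 0 then some ("", "")
  else if hi - lo = 1 then
    let n := nums.getD lo ""
    let w := words.getD lo ""
    if PySem.Str.len n != PySem.Str.len w then none else some (n, w)
  else
    let mid := (lo + hi) / 2
    match pvGo nums words lo mid with
    | none => none
    | some left =>
      match pvGo nums words mid hi with
      | none => none
      | some right => some (left.1 ++ right.1, left.2 ++ right.2)
termination_by hi - lo
decreasing_by all_goals omega

def concat_nums_and_words_alt (nums : List String) (words : List String) : String × String :=
  match pvGo nums words 0 (min nums.length words.length) with
  | none => ("12", "1")
  | some r => r

-- ===== PRECONDITION & SPEC =====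
def Spec_concat_nums_and_words (nums : List String) (words : List String) (out : String × String) : Prop := out = concat_nums_and_words_alt nums words
instance (nums : List String) (words : List String) (out : String × String) : Decidable (Spec_concat_nums_and_words nums words out) := by unfold Spec_concat_nums_and_words; infer_instance

-- ===== CLAIM (what is proved, stated in full; the proofs are below) =====
def Claim_equal_concat_nums_and_words : Prop := ∀ (nums : List String) (words : List String), Dom_concat_nums_and_words nums words → Spec_concat_nums_and_words nums words (concat_nums_and_words nums words)

-- ===== LEMMAS AND PROOFS =====

-- reference function: validity + both concatenations of a pair list, right-to-left
def pvGSpec : List (String × String) → Option (String × String)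
  | [] => some ("", "")
  | (n, w) :: rest =>
    if n.length ≠ w.length then none
    else match pvGSpec rest with
      | none => none
      | some (rn, rw) => some (n ++ rn, w ++ rw)

theorem pvGSpec_append (ps qs : List (String × String)) :
    pvGSpec (ps ++ qs) =
      match pvGSpec ps, pvGSpec qs with
      | some a, some b => some (a.1 ++ b.1, a.2 ++ b.2)
      | _, _ => none := by
  induction ps with
  | nil => cases hq : pvGSpec qs <;> simp [pvGSpec, hq]
  | cons p rest ih =>
    obtain ⟨n, w⟩ := p
    cases hr : pvGSpec rest <;> cases hq : pvGSpec qs <;>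
      by_cases h : n.length = w.length <;>
        simp [pvGSpec, hr, hq, ih, h, String.append_assoc]

theorem pvALoop_eq (ps : List (String × String)) (cn cw : String) :
    pvALoop ps cn cw =
      match pvGSpec ps with
      | none => ("12", "1")
      | some (rn, rw) => (cn ++ rn, cw ++ rw) := by
  induction ps generalizing cn cw with
  | nil => simp [pvALoop, pvGSpec]
  | cons p rest ih =>
    obtain ⟨n, w⟩ := p
    by_cases h : n.length = w.length
    · cases hr : pvGSpec rest <;>
        simp [pvALoop, pvGSpec, hr, ih, h, String.append_assoc]
    · simp [pvALoop, pvGSpec, h]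

theorem pvGo_eq (nums words : List String) (lo hi : Nat)
    (hle : lo ≤ hi) (hhi : hi ≤ (nums.zip words).length) :
    pvGo nums words lo hi = pvGSpec (((nums.zip words).drop lo).take (hi - lo)) := by
  generalize hk : hi - lo = k
  induction k using Nat.strong_induction_on generalizing lo hi with
  | _ k ih =>
    match k, hk with
    | 0, hk =>
      rw [pvGo]
      simp [hk, pvGSpec]
    | 1, hk =>
      have hlt : lo < (nums.zip words).length := by omega
      have hlt1 : lo < nums.length := by
        simp [List.length_zip] at hlt; omega
      have hlt2 : lo < words.length := by
        simp [List.length_zip] at hlt; omega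
      rw [pvGo]
      simp only [hk]
      have hdt : ((nums.zip words).drop lo).take 1 = [(nums.zip words)[lo]] := by
        rw [List.drop_eq_getElem_cons hlt]
        simp
      rw [hdt]
      have hget : (nums.zip words)[lo] = (nums[lo], words[lo]) := by
        simp [List.getElem_zip]
      have hgd1 : nums[lo]?.getD "" = nums[lo] := by
        rw [List.getElem?_eq_getElem hlt1]; rfl
      have hgd2 : words[lo]?.getD "" = words[lo] := by
        rw [List.getElem?_eq_getElem hlt2]; rfl
      by_cases h : nums[lo].length = words[lo].length <;>
        simp [pvGSpec, hget, hgd1, hgd2, h, PySem.Str.len]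
    | (m + 2), hk =>
      have h2 : lo + 2 ≤ hi := by omega
      rw [pvGo]
      simp only [show ¬ (hi - lo = 0) by omega, show ¬ (hi - lo = 1) by omega,
        if_false]
      set mid := (lo + hi) / 2 with hmid
      have hm1 : lo < mid := by omega
      have hm2 : mid < hi := by omega
      rw [ih (mid - lo) (by omega) lo mid (by omega) (by omega) rfl,
          ih (hi - mid) (by omega) mid hi (by omega) (by omega) rfl]
      have hsplit : ((nums.zip words).drop lo).take (hi - lo) =
          ((nums.zip words).drop lo).take (mid - lo) ++
          ((nums.zip words).drop mid).take (hi - mid) := by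
        rw [show hi - lo = (mid - lo) + (hi - mid) by omega, List.take_add,
            List.drop_drop, show lo + (mid - lo) = mid by omega]
      rw [hk] at hsplit
      rw [hsplit, pvGSpec_append]
      cases pvGSpec (((nums.zip words).drop lo).take (mid - lo)) with
      | none => rfl
      | some a =>
        cases pvGSpec (((nums.zip words).drop mid).take (hi - mid)) with
        | none => rfl
        | some b => rfl

-- ===== VERDICT (by name: the statement is the Claim_ definition above) =====
theorem concat_nums_and_words_spec : Claim_equal_concat_nums_and_words := by
  intro nums words _
  unfold Spec_concat_nums_and_words concat_nums_and_words concat_nums_and_words_alt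
  rw [pvGo_eq nums words 0 (min nums.length words.length) (Nat.zero_le _)
      (by simp [List.length_zip]), pvALoop_eq]
  rw [List.drop_zero, Nat.sub_zero,
      show (nums.zip words).take (min nums.length words.length) = nums.zip words from
        List.take_of_length_le (by simp [List.length_zip])]
  cases pvGSpec (nums.zip words) with
  | none => rfl
  | some r => obtain ⟨rn, rw⟩ := r; simp
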